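-- pv_equiv track=rewrite | github.com/noahbean33/MemGaze-Assumptions-Simulation | memgaze_simulation.py | strided_access
-- ===== SOURCE A (Python) =====
-- from typing import List, Tuple, Dict
--
-- def strided_access(mem_space: List[int], num_accesses: int, stride: int = 4) -> List[int]:
--     addresses = []
--     mem_len = len(mem_space)
--     index = 0
--     for _ in range(num_accesses):
--         addresses.append(mem_space[index])
--         index = (index + stride) % mem_len
--     return addresses
-- ===== SOURCE B (Python) =====
-- def _gcd(a, b):
--     while b:
--         a, b = b, a % b
--     return a
--
-- def strided_access(mem_space, num_accesses, stride=4):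
--     # The access pattern is periodic: compute one period of values, then tile it.
--     if num_accesses <= 0:
--         return []
--     mem_len = len(mem_space)
--     s = stride % mem_len
--     period = mem_len // _gcd(s, mem_len)
--     cycle = []
--     index = 0
--     for _ in range(period):
--         cycle.append(mem_space[index])
--         index = (index + s) % mem_len
--     q, r = divmod(num_accesses, period)
--     return cycle * q + cycle[:r]
-- ===== Notes on version B (the rewrite author's own statement) =====
-- stated objective: alternative
-- what changed: Instead of walking the index once per access, B exploits periodicity: it computes the cycle length len//gcd(stride%len, len), materialises one period of values, and tiles it as cycle*q + cycle[:r].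
import Mathlib
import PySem

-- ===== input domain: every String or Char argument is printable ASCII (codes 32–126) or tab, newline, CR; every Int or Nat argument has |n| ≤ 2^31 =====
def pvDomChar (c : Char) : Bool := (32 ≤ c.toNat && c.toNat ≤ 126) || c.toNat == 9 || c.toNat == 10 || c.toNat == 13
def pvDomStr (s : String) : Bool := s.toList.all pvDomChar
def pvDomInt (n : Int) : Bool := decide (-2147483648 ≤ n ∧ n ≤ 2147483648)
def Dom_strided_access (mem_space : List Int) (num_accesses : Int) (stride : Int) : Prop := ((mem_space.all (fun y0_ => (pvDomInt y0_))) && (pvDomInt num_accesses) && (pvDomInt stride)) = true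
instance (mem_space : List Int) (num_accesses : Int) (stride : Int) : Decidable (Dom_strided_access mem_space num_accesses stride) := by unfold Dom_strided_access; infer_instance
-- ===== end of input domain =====

-- B replaces A's per-access loop by a different algorithm: the access pattern is periodic
-- with period len/gcd(stride%len, len), so B materialises ONE period and tiles it
-- (cycle * q + cycle[:r]); objective: alternative.

-- ===== PORT A =====
-- Stateful loop: state = (addresses so far, current index); mem_space[index] is always
-- in range on Pre_ (index stays in [0, mem_len)), so the .getD 0 default is never used.
def strided_access (mem_space : List Int) (num_accesses : Int) (stride : Int) : List Int :=
  let mem_len : Int := mem_space.length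
  ((PySem.List.pyRange 0 num_accesses 1).foldl
    (fun (st : List Int × Int) _ =>
      (st.1 ++ [(PySem.List.pyGet? mem_space st.2).getD 0],
       PySem.Int.mod (st.2 + stride) mem_len))
    ([], 0)).1

-- ===== PORT B =====
-- port of Source B's hand-written Euclid helper _gcd (its arguments s, mem_len are ≥ 0 on
-- every input Pre_ admits, so the Nat type is exact there)
def pvEuclid (a b : Nat) : Nat :=
  if _h : b = 0 then a else pvEuclid b (a % b)
decreasing_by exact Nat.mod_lt _ (Nat.pos_of_ne_zero _h)

def strided_access_alt (mem_space : List Int) (num_accesses : Int) (stride : Int) : List Int :=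
  if num_accesses ≤ 0 then []
  else
    let mem_len : Int := mem_space.length
    let s : Int := PySem.Int.mod stride mem_len
    let period : Int := PySem.Int.floordiv mem_len ((pvEuclid s.toNat mem_len.toNat : Nat) : Int)
    -- one period of values, following the indices once
    let cycle : List Int :=
      ((PySem.List.pyRange 0 period 1).foldl
        (fun (st : List Int × Int) _ =>
          (st.1 ++ [(PySem.List.pyGet? mem_space st.2).getD 0],
           PySem.Int.mod (st.2 + s) mem_len)) ([], 0)).1
    -- q, r = divmod(num_accesses, period); period > 0 on Pre_, so floordiv/mod are exact
    let q : Int := PySem.Int.floordiv num_accesses period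
    let r : Int := PySem.Int.mod num_accesses period
    -- cycle * q + cycle[:r]  (q, r ≥ 0 here, so replicate/take are exact)
    (List.replicate q.toNat cycle).flatten ++ cycle.take r.toNat

-- ===== PRECONDITION & SPEC =====
-- A raises IndexError (and B ZeroDivisionError) when mem_space is empty and at least one
-- access is requested; exactly those inputs are excluded.
def Pre_strided_access (mem_space : List Int) (num_accesses : Int) (stride : Int) : Prop :=
  mem_space ≠ [] ∨ num_accesses ≤ 0
instance (mem_space : List Int) (num_accesses : Int) (stride : Int) : Decidable (Pre_strided_access mem_space num_accesses stride) := by unfold Pre_strided_access; infer_instance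
def pvWitness_strided_access : List Int × Int × Int := ([10, 20, 30], 5, 4)

def Spec_strided_access (mem_space : List Int) (num_accesses : Int) (stride : Int) (out : List Int) : Prop := out = strided_access_alt mem_space num_accesses stride
instance (mem_space : List Int) (num_accesses : Int) (stride : Int) (out : List Int) : Decidable (Spec_strided_access mem_space num_accesses stride out) := by unfold Spec_strided_access; infer_instance

-- ===== CLAIM (what is proved, stated in full; the proofs are below) =====
def Claim_equal_strided_access : Prop := ∀ (mem_space : List Int) (num_accesses : Int) (stride : Int), Dom_strided_access mem_space num_accesses stride → Pre_strided_access mem_space num_accesses stride → Spec_strided_access mem_space num_accesses stride (strided_access mem_space num_accesses stride)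

-- ===== LEMMAS AND PROOFS =====

-- Source B's Euclid computes the gcd (flipped-argument recursion of Nat.gcd)
theorem pvEuclid_eq_gcd (a b : Nat) : pvEuclid a b = Nat.gcd b a := by
  induction a, b using pvEuclid.induct with
  | case1 a => rw [pvEuclid]; simp
  | case2 a b hb ih =>
      rw [pvEuclid]
      simp only [hb, dite_false]
      rw [ih, Nat.gcd_comm (a % b) b, Nat.gcd_rec b a]
      exact Nat.gcd_comm _ _

-- the n-th value visited by a step-`st` modular walk, in closed form
def pvF (mem_space : List Int) (st : Int) (n : Nat) : Int :=
  (PySem.List.pyGet? mem_space (PySem.Int.mod ((n : Int) * st) (mem_space.length : Int))).getD 0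

-- Loop invariant (shared shape of A's loop and B's cycle loop): after n iterations the
-- state is (the first n closed-form values, (n*st) % mem_len).
theorem strided_access_inv (mem_space : List Int) (st : Int)
    (h : mem_space ≠ []) (n : Nat) :
    ((PySem.List.pyRange 0 (n : Int) 1).foldl
      (fun (acc : List Int × Int) _ =>
        (acc.1 ++ [(PySem.List.pyGet? mem_space acc.2).getD 0],
         PySem.Int.mod (acc.2 + st) (mem_space.length : Int)))
      ([], 0))
    = ((List.range n).map (pvF mem_space st),
       PySem.Int.mod ((n : Int) * st) (mem_space.length : Int)) := by
  have hm : 0 < (mem_space.length : Int) := by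
    cases mem_space with
    | nil => exact absurd rfl h
    | cons a l => simp
  induction n with
  | zero =>
      simp [PySem.List.pyRange_one_eq_nil, PySem.Int.mod_eq_emod_of_pos hm]
  | succ k ih =>
      have hsplit : PySem.List.pyRange 0 ((k : Int) + 1) 1
          = PySem.List.pyRange 0 (k : Int) 1 ++ [(k : Int)] :=
        PySem.List.pyRange_one_succ_right (by positivity)
      push_cast
      rw [hsplit, List.foldl_append, ih, List.range_succ, List.map_append]
      simp only [List.foldl_cons, List.foldl_nil, List.map_cons, List.map_nil]
      refine Prod.ext ?_ ?_
      · simp [pvF]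
      · simp only
        rw [PySem.Int.mod_eq_emod_of_pos hm, PySem.Int.mod_eq_emod_of_pos hm,
            PySem.Int.mod_eq_emod_of_pos hm, Int.emod_add_emod]
        ring_nf

-- replacing the step by its residue does not change the visited values
theorem pvF_mod (mem_space : List Int) (st : Int) (hm : 0 < (mem_space.length : Int)) :
    pvF mem_space st = pvF mem_space (PySem.Int.mod st (mem_space.length : Int)) := by
  funext n
  unfold pvF
  rw [PySem.Int.mod_eq_emod_of_pos hm, PySem.Int.mod_eq_emod_of_pos hm,
      PySem.Int.mod_eq_emod_of_pos hm, Int.mul_emod (n : Int) st,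
      Int.mul_emod (n : Int) (st % (mem_space.length : Int)),
      Int.emod_emod_of_dvd st dvd_rfl]

-- periodicity of the visited values
theorem pvF_periodic (mem_space : List Int) (st : Int) (p : Nat)
    (hm : 0 < (mem_space.length : Int))
    (hdvd : (mem_space.length : Int) ∣ (p : Int) * st) (i : Nat) :
    pvF mem_space st (i + p) = pvF mem_space st i := by
  unfold pvF
  rw [PySem.Int.mod_eq_emod_of_pos hm, PySem.Int.mod_eq_emod_of_pos hm]
  obtain ⟨k, hk⟩ := hdvd
  have : ((i + p : Nat) : Int) * st = (i : Int) * st + (mem_space.length : Int) * k := by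
    push_cast; rw [add_mul, hk]
  rw [this, Int.add_mul_emod_self_left]

-- tiling a periodic prefix: the first q*p+r values are q copies of one period plus r extras
theorem pvTile (F : Nat → Int) (p q r : Nat) (hr : r ≤ p)
    (hper : ∀ i, F (i + p) = F i) :
    (List.range (q * p + r)).map F
      = (List.replicate q ((List.range p).map F)).flatten
        ++ ((List.range p).map F).take r := by
  induction q with
  | zero =>
      simp only [Nat.zero_mul, Nat.zero_add, List.replicate_zero, List.flatten_nil,
        List.nil_append, ← List.map_take, List.take_range]
      rw [Nat.min_eq_left hr]
  | succ q ih =>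
      have hsplit : (q + 1) * p + r = p + (q * p + r) := by ring
      rw [hsplit, List.range_add, List.map_append, List.map_map]
      have hshift : (List.range (q * p + r)).map (F ∘ fun i => p + i)
          = (List.range (q * p + r)).map F := by
        refine List.map_congr_left (fun i _ => ?_)
        simp only [Function.comp]
        rw [Nat.add_comm p i, hper i]
      rw [hshift, ih, List.replicate_succ, List.flatten_cons, List.append_assoc]

-- ===== VERDICT (by name: the statement is the Claim_ definition above) =====
theorem strided_access_spec : Claim_equal_strided_access := by
  intro mem_space num_accesses stride _ hpre
  unfold Spec_strided_access strided_access strided_access_alt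
  by_cases hn : num_accesses ≤ 0
  · simp [PySem.List.pyRange_one_eq_nil hn, hn]
  · have hne : mem_space ≠ [] := by
      rcases hpre with h | h
      · exact h
      · omega
    have hN : 0 < num_accesses := by omega
    rw [if_neg hn]
    have hm : 0 < (mem_space.length : Int) := by
      cases mem_space with
      | nil => exact absurd rfl hne
      | cons a l => simp
    have hmN : 0 < mem_space.length := by exact_mod_cast hm
    dsimp only
    -- names
    set mlen : Int := (mem_space.length : Int) with hmlen
    set s : Int := PySem.Int.mod stride mlen with hs
    have hs0 : 0 ≤ s := PySem.Int.mod_nonneg _ hm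
    have hsN : s = (s.toNat : Int) := by omega
    have hmlt : mlen.toNat = mem_space.length := by simp [hmlen]
    -- the gcd and the period
    set g : Nat := pvEuclid s.toNat mlen.toNat with hg
    have hgval : g = Nat.gcd mlen.toNat s.toNat := by rw [hg, pvEuclid_eq_gcd]
    have hgpos : 0 < g := by
      rw [hgval]; exact Nat.gcd_pos_of_pos_left _ (by omega)
    have hgdvd_m : g ∣ mem_space.length := by
      rw [hgval, hmlt]; exact Nat.gcd_dvd_left _ _
    have hgdvd_s : g ∣ s.toNat := by rw [hgval]; exact Nat.gcd_dvd_right _ _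
    set p : Nat := mem_space.length / g with hp
    have hperiod : PySem.Int.floordiv mlen (g : Int) = (p : Int) := by
      rw [hmlen]
      exact_mod_cast PySem.Int.floordiv_natCast mem_space.length g
    have hppos : 0 < p := Nat.div_pos (Nat.le_of_dvd hmN hgdvd_m) hgpos
    have hpdvd : mlen ∣ (p : Int) * s := by
      obtain ⟨k, hk⟩ := hgdvd_s
      refine ⟨(k : Int), ?_⟩
      rw [hsN]
      rw [← Nat.cast_mul, ← Nat.cast_mul, hp, hk]
      congr 1
      rw [← Nat.mul_assoc, Nat.div_mul_cancel hgdvd_m]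
    -- abstract B's q, r first (so later rewrites leave them intact)
    rw [hperiod]
    set q : Int := PySem.Int.floordiv num_accesses (p : Int) with hq
    set r : Int := PySem.Int.mod num_accesses (p : Int) with hr
    -- A's loop in closed form
    have hNN : num_accesses = ((num_accesses.toNat : Nat) : Int) := by omega
    rw [hNN, strided_access_inv mem_space stride hne num_accesses.toNat]
    -- B's cycle loop in closed form
    rw [strided_access_inv mem_space s hne p]
    dsimp only
    have hppos' : (0 : Int) < (p : Int) := by exact_mod_cast hppos
    have hq0 : 0 ≤ q := by
      rw [hq, PySem.Int.floordiv_eq_ediv_of_pos hppos']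
      exact Int.ediv_nonneg (by omega) (by omega)
    have hr0 : 0 ≤ r := PySem.Int.mod_nonneg _ hppos'
    have hrlt : r < (p : Int) := PySem.Int.mod_lt _ hppos'
    have hsum : q * (p : Int) + r = num_accesses := by
      rw [hq, hr, PySem.Int.floordiv_eq_ediv_of_pos hppos',
          PySem.Int.mod_eq_emod_of_pos hppos', Int.mul_comm]
      exact Int.mul_ediv_add_emod _ _
    have hNnat : num_accesses.toNat = q.toNat * p + r.toNat := by
      have h2 : ((q.toNat * p + r.toNat : Nat) : Int) = num_accesses := by
        push_cast
        rw [Int.toNat_of_nonneg hq0, Int.toNat_of_nonneg hr0]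
        exact hsum
      omega
    have hrle : r.toNat ≤ p := by omega
    -- assemble via periodic tiling
    rw [pvF_mod mem_space stride hm, ← hs, hNnat]
    exact pvTile (pvF mem_space s) p q.toNat r.toNat hrle
      (pvF_periodic mem_space s p hm hpdvd)
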